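-- pv_equiv track=rewrite | github.com/miliar/Code_Jam_Webscraper | Solutions_python/Problem_138/1274.py | war
-- ===== SOURCE A (Python) =====
-- import bisect
--
-- def war(a, b):
--   r = 0
--   n = len(a)
--   while len(a):
--     idx = bisect.bisect(b, a[0])
--     if idx != len(b):
--       r += 1
--       del b[idx]
--       del a[0]
--     else:
--       break;
--   return n-r
-- ===== SOURCE B (Python) =====
-- import bisect
--
-- def war(a, b):
--     # Greedy matching without mutating the arguments and without a matched-counter:
--     # on the first unbeatable element, return the size of the unmatched remainder directly.
--     bs = b[:]
--     for k, x in enumerate(a):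
--         i = bisect.bisect(bs, x)
--         if i == len(bs):
--             return len(a) - k
--         del bs[i]
--     return 0
-- ===== Notes on version B (the rewrite author's own statement) =====
-- stated objective: simpler
-- what changed: B keeps both arguments unmutated and returns the length of the unmatched remainder of a directly, eliminating A's matched-counter r, the final n-r arithmetic and the in-place del operations; the bisect-based greedy step itself is retained because bisect's result on a possibly unsorted b is path-dependent and therefore semantically forced.
import Mathlib
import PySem

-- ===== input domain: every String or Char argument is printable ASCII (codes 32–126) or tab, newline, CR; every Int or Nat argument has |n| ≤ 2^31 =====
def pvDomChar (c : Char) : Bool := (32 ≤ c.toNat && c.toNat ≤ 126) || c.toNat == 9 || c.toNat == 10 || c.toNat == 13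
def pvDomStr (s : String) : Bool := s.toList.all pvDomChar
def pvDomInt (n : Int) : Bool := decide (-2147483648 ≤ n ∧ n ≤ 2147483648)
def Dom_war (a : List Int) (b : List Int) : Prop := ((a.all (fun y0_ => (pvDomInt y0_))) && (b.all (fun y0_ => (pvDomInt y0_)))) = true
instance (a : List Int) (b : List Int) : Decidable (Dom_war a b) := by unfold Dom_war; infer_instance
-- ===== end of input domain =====

-- B drops A's matched-counter r / n-r arithmetic and returns the size of the unmatched
-- remainder directly via enumerate + early return (objective: simpler). Equivalence is
-- about the RETURN value only: Python A mutates a and b in place, B leaves them untouched.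

-- ===== PORT A =====
-- A's while-loop: state = (remaining a, current b, counter r), fixed n; del b[idx] for
-- an in-range idx is List.eraseIdx; bisect.bisect is PySem.List.bisectRight.
def warLoop (a : List Int) (b : List Int) (r : Int) (n : Int) : Int :=
  match a with
  | [] => n - r
  | x :: rest =>
      let idx := PySem.List.bisectRight b x
      if idx ≠ b.length then
        warLoop rest (b.eraseIdx idx) (r + 1) n
      else
        n - r

def war (a : List Int) (b : List Int) : Int :=
  warLoop a b 0 (a.length : Int)

-- ===== PORT B =====
-- B's for-loop over enumerate(a): state = (remaining (k, x) pairs, private copy bs);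
-- early 'return len(a) - k' on failure, 'del bs[i]' is List.eraseIdx, fall-through 0.
def warAltLoop (pairs : List (Int × Int)) (bs : List Int) (n : Int) : Int :=
  match pairs with
  | [] => 0
  | (k, x) :: rest =>
      let i := PySem.List.bisectRight bs x
      if i = bs.length then n - k
      else warAltLoop rest (bs.eraseIdx i) n

def war_alt (a : List Int) (b : List Int) : Int :=
  warAltLoop (PySem.List.enumerate a) b (a.length : Int)

-- ===== PRECONDITION & SPEC =====
def Spec_war (a : List Int) (b : List Int) (out : Int) : Prop := out = war_alt a b
instance (a : List Int) (b : List Int) (out : Int) : Decidable (Spec_war a b out) := by unfold Spec_war; infer_instance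

-- ===== CLAIM (what is proved, stated in full; the proofs are below) =====
def Claim_equal_war : Prop := ∀ (a : List Int) (b : List Int), Dom_war a b → Spec_war a b (war a b)

-- ===== LEMMAS AND PROOFS =====

-- A's counter r coincides with B's enumerate index k, and A's n - r at exhaustion is 0.
theorem warLoop_eq_alt (a : List Int) : ∀ (b : List Int) (r : Int),
    warLoop a b r (r + (a.length : Int))
      = warAltLoop (PySem.List.enumerate a r) b (r + (a.length : Int)) := by
  induction a with
  | nil => intro b r; simp [warLoop, warAltLoop, PySem.List.enumerate]
  | cons x t ih =>
      intro b r
      by_cases h : PySem.List.bisectRight b x = b.length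
      · simp [warLoop, warAltLoop, PySem.List.enumerate, h]
      · have hn : r + ((x :: t).length : Int) = (r + 1) + (t.length : Int) := by
          simp; ring
        simp only [warLoop, warAltLoop, PySem.List.enumerate,
          if_neg (by exact fun hh => h hh), if_pos h, hn]
        exact ih _ (r + 1)

-- ===== VERDICT (by name: the statement is the Claim_ definition above) =====
theorem war_spec : Claim_equal_war := by
  intro a b _
  unfold Spec_war war war_alt
  have := warLoop_eq_alt a b 0
  simpa using this
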